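-- pv_equiv track=rewrite | github.com/abdrehman98/Air-Quality-Sensor | AIR-POLLUTION-DATA-ANALYSIS/DATA ANALYSIS CODE/py/analysis.py | hist
-- ===== SOURCE A (Python) =====
-- def hist(v, r):
--     y = [0] * (len(r) - 1)
--     for vn in v:
--         for i in range(len(y)):
--             if r[i] <= vn <= r[i + 1]:
--                 y[i] += 1
--
--     x = [None] * len(y)
--     for i in range(len(x)):
--         x[i] = "[ " + str(r[i]) + " - " + str(r[i + 1]) + " ]"
--
--     return x, y
-- ===== SOURCE B (Python) =====
-- def hist(v, r):
--     # Sort the values once, then binary-search each bin edge: O((n+m) log n)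
--     # instead of A's O(n*m).  Both bin ends are inclusive in A, so a bin count
--     # is (#values <= right edge) - (#values < left edge), clamped at 0 for an
--     # inverted (right < left) bin, which A counts as 0.
--     sv = sorted(v)
--
--     def bisect_left(x):
--         lo, hi = 0, len(sv)
--         while lo < hi:
--             mid = (lo + hi) // 2
--             if sv[mid] < x:
--                 lo = mid + 1
--             else:
--                 hi = mid
--         return lo
--
--     def bisect_right(x):
--         lo, hi = 0, len(sv)
--         while lo < hi:
--             mid = (lo + hi) // 2
--             if x < sv[mid]:
--                 hi = mid
--             else:
--                 lo = mid + 1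
--         return lo
--
--     y = [max(0, bisect_right(r[i + 1]) - bisect_left(r[i])) for i in range(len(r) - 1)]
--     x = ["[ " + str(r[i]) + " - " + str(r[i + 1]) + " ]" for i in range(len(r) - 1)]
--     return x, y
-- ===== Notes on version B (the rewrite author's own statement) =====
-- stated objective: faster
-- what changed: B sorts the values once and binary-searches each bin's two edges (rank difference, clamped at 0 for an inverted bin) instead of A's nested scan testing every value against every bin.
import Mathlib
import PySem

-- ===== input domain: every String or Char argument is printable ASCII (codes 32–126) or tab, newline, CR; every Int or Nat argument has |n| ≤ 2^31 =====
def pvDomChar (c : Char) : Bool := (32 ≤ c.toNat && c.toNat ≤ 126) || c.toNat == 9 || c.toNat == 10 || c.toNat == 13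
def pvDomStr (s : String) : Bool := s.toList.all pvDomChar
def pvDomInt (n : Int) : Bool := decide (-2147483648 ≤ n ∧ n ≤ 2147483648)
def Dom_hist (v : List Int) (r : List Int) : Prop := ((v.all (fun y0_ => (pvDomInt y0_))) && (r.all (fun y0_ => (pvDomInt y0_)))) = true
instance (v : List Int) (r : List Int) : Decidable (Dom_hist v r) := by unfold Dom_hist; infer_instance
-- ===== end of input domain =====

-- B sorts the values once and binary-searches the two edges of each bin (rank difference,
-- clamped at 0 for an inverted bin) instead of A's nested value×bin scan.

-- ===== PORT A =====
-- Literal transliteration of A.  Notes: '[0] * (len(r) - 1)' is [] when len(r) = 0 in Python,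
-- which Nat subtraction reproduces; the indices r[i], r[i+1] are always in range
-- (i + 1 ≤ len(y) = len(r) - 1 < len(r)), so pyGetD is exact there; '[None] * len(y)' uses ""
-- as the placeholder — every slot is overwritten before the list is returned.
def hist (v : List Int) (r : List Int) : List String × List Int :=
  let y := v.foldl (fun y vn =>
      (List.range y.length).foldl (fun y (i : Nat) =>
        if PySem.List.pyGetD r (i : Int) 0 ≤ vn ∧ vn ≤ PySem.List.pyGetD r ((i : Int) + 1) 0 then
          y.set i (y.getD i 0 + 1)
        else y) y)
    (List.replicate (r.length - 1) (0 : Int))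
  let x := (List.range y.length).foldl (fun x (i : Nat) =>
      x.set i ("[ " ++ PySem.Int.toStr (PySem.List.pyGetD r (i : Int) 0) ++ " - " ++
               PySem.Int.toStr (PySem.List.pyGetD r ((i : Int) + 1) 0) ++ " ]"))
    (List.replicate y.length "")
  (x, y)

-- ===== PORT B =====
-- Source B's hand-written bisect_left/bisect_right are the standard lo/hi binary-search loops,
-- ported as PySem.List.bisectLeft / bisectRight (the same fueled lo/hi binary search).
def hist_alt (v : List Int) (r : List Int) : List String × List Int :=
  let sv := PySem.List.sorted v (fun x => x) false
  let y := (List.range (r.length - 1)).map (fun (i : Nat) =>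
      max 0 ((PySem.List.bisectRight sv (PySem.List.pyGetD r ((i : Int) + 1) 0) : Int) -
             (PySem.List.bisectLeft sv (PySem.List.pyGetD r (i : Int) 0) : Int)))
  let x := (List.range (r.length - 1)).map (fun (i : Nat) =>
      "[ " ++ PySem.Int.toStr (PySem.List.pyGetD r (i : Int) 0) ++ " - " ++
      PySem.Int.toStr (PySem.List.pyGetD r ((i : Int) + 1) 0) ++ " ]")
  (x, y)

-- ===== PRECONDITION & SPEC =====
def Spec_hist (v : List Int) (r : List Int) (out : List String × List Int) : Prop := out = hist_alt v r
instance (v : List Int) (r : List Int) (out : List String × List Int) : Decidable (Spec_hist v r out) := by unfold Spec_hist; infer_instance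

-- ===== CLAIM (what is proved, stated in full; the proofs are below) =====
def Claim_equal_hist : Prop := ∀ (v : List Int) (r : List Int), Dom_hist v r → Spec_hist v r (hist v r)

-- ===== LEMMAS AND PROOFS =====

-- countP equals k when the predicate holds exactly on the indices below k.
theorem countP_eq_of_boundary (xs : List Int) (p : Int → Bool) (k : Nat) (hk : k ≤ xs.length)
    (h1 : ∀ j (hj : j < xs.length), j < k → p xs[j])
    (h2 : ∀ j (hj : j < xs.length), k ≤ j → ¬ p xs[j]) : xs.countP p = k := by
  have hsplit : xs = xs.take k ++ xs.drop k := (List.take_append_drop k xs).symm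
  rw [hsplit, List.countP_append]
  have htake : (xs.take k).countP p = (xs.take k).length := by
    apply List.countP_eq_length.2
    intro a ha
    obtain ⟨j, hj, rfl⟩ := List.mem_iff_getElem.1 ha
    rw [List.getElem_take]
    exact h1 j (by have := List.length_take_le k xs; omega) (by
      have := hj; simp [List.length_take] at this; omega)
  have hdrop : (xs.drop k).countP p = 0 := by
    apply List.countP_eq_zero.2
    intro a ha
    obtain ⟨j, hj, rfl⟩ := List.mem_iff_getElem.1 ha
    rw [List.getElem_drop]
    exact h2 (k + j) (by simp at hj; omega) (by omega)
  rw [htake, hdrop, List.length_take]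
  omega

-- on a sorted list, bisect_left x is the number of elements < x
theorem bisectLeft_eq_countP (xs : List Int) (x : Int) (hs : xs.Pairwise (· ≤ ·)) :
    PySem.List.bisectLeft xs x = xs.countP (fun e => decide (e < x)) := by
  obtain ⟨h0, h1, h2⟩ := PySem.List.bisectLeft_spec xs x hs
  refine (countP_eq_of_boundary xs _ _ h0 ?_ ?_).symm
  · intro j hj hjk
    simp only [decide_eq_true_eq]
    exact h1 j hj hjk
  · intro j hj hkj
    simp only [decide_eq_true_eq]
    exact not_lt.2 (h2 j hj hkj)

-- on a sorted list, bisect_right x is the number of elements ≤ x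
theorem bisectRight_eq_countP (xs : List Int) (x : Int) (hs : xs.Pairwise (· ≤ ·)) :
    PySem.List.bisectRight xs x = xs.countP (fun e => decide (e ≤ x)) := by
  obtain ⟨h0, h1, h2⟩ := PySem.List.bisectRight_spec xs x hs
  refine (countP_eq_of_boundary xs _ _ h0 ?_ ?_).symm
  · intro j hj hjk
    simp only [decide_eq_true_eq]
    exact h1 j hj hjk
  · intro j hj hkj
    simp only [decide_eq_true_eq]
    exact not_le.2 (h2 j hj hkj)

-- the clamped rank difference counts the values in the inclusive range [lo, hi]
theorem maxsub_countP (v : List Int) (lo hi : Int) :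
    max 0 ((v.countP (fun e => decide (e ≤ hi)) : Int) - (v.countP (fun e => decide (e < lo)) : Int))
      = v.countP (fun e => decide (lo ≤ e ∧ e ≤ hi)) := by
  induction v with
  | nil => simp
  | cons a t ih =>
    have aux1 : lo ≤ hi → t.countP (fun e => decide (e < lo)) ≤ t.countP (fun e => decide (e ≤ hi)) := by
      intro h
      apply List.countP_mono_left
      intro b _ hb
      simp only [decide_eq_true_eq] at hb ⊢
      omega
    have aux2 : hi < lo → t.countP (fun e => decide (e ≤ hi)) ≤ t.countP (fun e => decide (e < lo)) := by
      intro h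
      apply List.countP_mono_left
      intro b _ hb
      simp only [decide_eq_true_eq] at hb ⊢
      omega
    simp only [List.countP_cons, decide_eq_true_eq]
    by_cases hlo : a < lo <;> by_cases hhi : a ≤ hi
    · have h2 : ¬ (lo ≤ a ∧ a ≤ hi) := by omega
      simp only [if_pos hlo, if_pos hhi, if_neg h2]
      push_cast
      omega
    · have h2 : ¬ (lo ≤ a ∧ a ≤ hi) := by omega
      have := aux2 (by omega)
      simp only [if_pos hlo, if_neg hhi]
      push_cast
      omega
    · have h2 : (lo ≤ a ∧ a ≤ hi) := by omega
      have := aux1 (by omega)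
      simp only [if_neg hlo, if_pos hhi, if_pos h2]
      push_cast
      omega
    · have h2 : ¬ (lo ≤ a ∧ a ≤ hi) := by omega
      simp only [if_neg hlo, if_neg hhi]
      push_cast
      omega

-- a fold of in-place sets over the full index range builds the corresponding map
theorem setfold_eq_map {α : Type} (f : Nat → α) (x0 : List α) (n : Nat) (hn : n ≤ x0.length) :
    (List.range n).foldl (fun x i => x.set i (f i)) x0 = (List.range n).map f ++ x0.drop n := by
  induction n with
  | zero => simp
  | succ n ih =>
    rw [List.range_succ, List.foldl_append, ih (by omega), List.foldl_cons, List.foldl_nil,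
        List.map_append]
    rw [List.set_append_right _ _ (by simp)]
    simp
    rw [List.drop_eq_getElem_cons (show n < x0.length by omega), List.set_cons_zero]

-- A's inner loop preserves the length of y
theorem condfold_length (C : Nat → Prop) [DecidablePred C] (ls : List Nat) (y : List Int) :
    (ls.foldl (fun y i => if C i then y.set i (y.getD i 0 + 1) else y) y).length = y.length := by
  induction ls generalizing y with
  | nil => rfl
  | cons i ls ih =>
    rw [List.foldl_cons, ih]
    by_cases h : C i <;> simp [h]

-- A's inner loop, pointwise: slot j gains 1 exactly when j < n and the condition holds at j
theorem condfold_getD (C : Nat → Prop) [DecidablePred C] (n : Nat) (y : List Int)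
    (j : Nat) (hj : j < y.length) :
    ((List.range n).foldl (fun y i => if C i then y.set i (y.getD i 0 + 1) else y) y).getD j 0
      = if j < n ∧ C j then y.getD j 0 + 1 else y.getD j 0 := by
  induction n with
  | zero => simp
  | succ n ih =>
    rw [List.range_succ, List.foldl_append, List.foldl_cons, List.foldl_nil]
    have hlen : ((List.range n).foldl (fun y i => if C i then y.set i (y.getD i 0 + 1) else y) y).length = y.length :=
      condfold_length C _ y
    rw [List.getD_eq_getElem?_getD] at ih ⊢
    by_cases hC : C n
    · rw [if_pos hC]
      by_cases hjn : j = n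
      · subst hjn
        rw [List.getElem?_set_self (by rw [hlen]; omega)]
        simp only [Option.getD_some]
        rw [List.getD_eq_getElem?_getD, ih]
        simp [hC, hj]
      · rw [List.getElem?_set_ne (fun h => hjn h.symm)]
        rw [ih]
        by_cases hjn' : j < n
        · have h1 : j < n + 1 := by omega
          simp [hjn', h1]
        · have h1 : ¬ (j < n + 1) := by omega
          simp [hjn', h1]
    · rw [if_neg hC, ih]
      by_cases hjn : j = n
      · subst hjn
        simp [hC]
      · by_cases hjn' : j < n
        · have h1 : j < n + 1 := by omega
          simp [hjn', h1]
        · have h1 : ¬ (j < n + 1) := by omega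
          simp [hjn', h1]

-- A's outer loop preserves the length of y
theorem outer_length (C : Nat → Int → Prop) [∀ i vn, Decidable (C i vn)] (v : List Int) (y : List Int) :
    (v.foldl (fun y vn =>
        (List.range y.length).foldl (fun y i => if C i vn then y.set i (y.getD i 0 + 1) else y) y) y).length
      = y.length := by
  induction v generalizing y with
  | nil => rfl
  | cons vn v ih =>
    rw [List.foldl_cons, ih, condfold_length]

-- A's outer loop: slot j accumulates the count of values satisfying the condition at j
theorem outer_getD (C : Nat → Int → Prop) [∀ i vn, Decidable (C i vn)] (v : List Int) (y : List Int)
    (j : Nat) (hj : j < y.length) :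
    (v.foldl (fun y vn =>
        (List.range y.length).foldl (fun y i => if C i vn then y.set i (y.getD i 0 + 1) else y) y) y).getD j 0
      = y.getD j 0 + (v.countP (fun vn => decide (C j vn)) : Int) := by
  induction v generalizing y with
  | nil => simp
  | cons vn v ih =>
    rw [List.foldl_cons]
    rw [ih _ (by rw [condfold_length]; exact hj)]
    rw [condfold_getD (fun i => C i vn) y.length y j hj]
    rw [List.countP_cons]
    by_cases hC : C j vn
    · simp [hC, hj]
      ring
    · simp [hC]

theorem hist_main (v r : List Int) : hist v r = hist_alt v r := by
  unfold hist hist_alt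
  have hsortedperm := PySem.List.sorted_perm v (fun x => x) false
  have hpw : (PySem.List.sorted v (fun x => x) false).Pairwise (· ≤ ·) := by
    simpa using PySem.List.sorted_pairwise v (fun x => x)
  set C : Nat → Int → Prop := fun i vn =>
    PySem.List.pyGetD r (i : Int) 0 ≤ vn ∧ vn ≤ PySem.List.pyGetD r ((i : Int) + 1) 0 with hC
  set y0 : List Int := List.replicate (r.length - 1) (0 : Int) with hy0
  set yA := v.foldl (fun y vn =>
      (List.range y.length).foldl (fun y (i : Nat) =>
        if C i vn then y.set i (y.getD i 0 + 1) else y) y) y0 with hyA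
  have lenA : yA.length = r.length - 1 := by
    rw [hyA, outer_length, hy0, List.length_replicate]
  have hy : yA = (List.range (r.length - 1)).map (fun (i : Nat) =>
      max 0 ((PySem.List.bisectRight (PySem.List.sorted v (fun x => x) false) (PySem.List.pyGetD r ((i : Int) + 1) 0) : Int) -
             (PySem.List.bisectLeft (PySem.List.sorted v (fun x => x) false) (PySem.List.pyGetD r (i : Int) 0) : Int))) := by
    apply List.ext_getElem
    · simp [lenA]
    · intro j hj hj'
      rw [List.getElem_map, List.getElem_range]
      rw [bisectRight_eq_countP _ _ hpw, bisectLeft_eq_countP _ _ hpw]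
      rw [hsortedperm.countP_eq, hsortedperm.countP_eq]
      rw [maxsub_countP]
      have hjm : j < r.length - 1 := by rwa [lenA] at hj
      rw [← List.getD_eq_getElem yA 0 hj]
      rw [hyA, outer_getD C v y0 j (by rw [hy0, List.length_replicate]; exact hjm)]
      simp [hy0, hC]
  refine Prod.ext ?_ ?_
  · show ((List.range yA.length).foldl _ (List.replicate yA.length "")) = _
    rw [setfold_eq_map _ _ _ (by rw [List.length_replicate])]
    rw [lenA]
    simp
  · exact hy

-- ===== VERDICT (by name: the statement is the Claim_ definition above) =====
theorem hist_spec : Claim_equal_hist := by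
  intro v r _
  exact hist_main v r
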